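-- pv_equiv track=rewrite | github.com/grantbreaksthings/buggyboy | software/cipher/main.py | encode_letter
-- ===== SOURCE A (Python) =====
-- def encode_letter(c: str) -> str:
--     if c == " ":
--         return "*"
--     if c == ".":
--         return c
--     c = c.lower()
--     lut = ["_,@", "abc", "def", "ghi", "jkl", "mno", "pqrs", "tuv", "wxyz"]
--     for entry in lut:
--         current_index = lut.index(entry) + 1
--         encoded_letter = str()
--         for char in entry:
--             encoded_letter = encoded_letter + str(current_index)
--             if char == c:
--                 return encoded_letter
--     return ""
-- ===== SOURCE B (Python) =====
-- def encode_letter(c: str) -> str: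
--     if c == " ":
--         return "*"
--     if c == ".":
--         return c
--     c = c.lower()
--     if len(c) != 1:
--         return ""
--     if 'a' <= c <= 'z':
--         idx = ord(c) - ord('a')
--         if idx < 15:
--             digit, rep = 2 + idx // 3, idx % 3 + 1
--         elif idx < 19:
--             digit, rep = 7, idx - 14
--         elif idx < 22:
--             digit, rep = 8, idx - 18
--         else:
--             digit, rep = 9, idx - 21
--         return str(digit) * rep
--     pos = "_,@".find(c)
--     if pos >= 0:
--         return "1" * (pos + 1)
--     return ""
-- ===== Notes on version B (the rewrite author's own statement) =====
-- stated objective: alternative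
-- what changed: Replaces A's scan over the keypad table with early-return string building by closed-form arithmetic on the character code (digit = 2 + idx//3, repeat = idx%3 + 1, with corrections for the 4-key groups pqrs/wxyz), plus a length guard and a find on the 3-char symbol string; no table scan or per-entry lut.index remains.
import Mathlib
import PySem

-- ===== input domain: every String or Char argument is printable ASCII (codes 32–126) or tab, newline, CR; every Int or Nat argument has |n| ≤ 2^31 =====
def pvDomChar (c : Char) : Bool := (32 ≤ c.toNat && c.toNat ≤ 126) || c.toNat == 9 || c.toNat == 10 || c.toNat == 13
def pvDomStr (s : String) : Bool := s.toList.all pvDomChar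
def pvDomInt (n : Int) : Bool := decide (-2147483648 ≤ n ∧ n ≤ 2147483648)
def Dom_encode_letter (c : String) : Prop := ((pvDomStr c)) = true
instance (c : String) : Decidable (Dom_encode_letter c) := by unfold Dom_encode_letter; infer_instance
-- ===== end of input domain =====

-- B replaces A's table scan by closed-form keypad arithmetic on the character code
-- (digit = 2 + idx//3 with corrections for the 4-key groups); objective: alternative.

-- ===== PORT A =====
-- inner 'for char in entry' loop: accumulates encoded_letter, early-returns some on match
def encodeLetterInner (c : String) (currentIndex : Int) (chars : List Char) (acc : List Char) : Option String :=
  match chars with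
  | [] => none
  | ch :: rest =>
    let acc := acc ++ (PySem.Int.toStr currentIndex).toList
    if String.ofList [ch] == c then some (String.ofList acc)
    else encodeLetterInner c currentIndex rest acc

-- 'return the early-returned value if any, else continue the loop'
def encodeLetterOrElse (o : Option String) (e : String) : String :=
  match o with
  | some r => r
  | none => e

-- outer 'for entry in lut' loop; lut.index never fails here (entry ∈ lut), ported with .getD 0
def encodeLetterLoop (c : String) (lut : List String) (entries : List String) : String :=
  match entries with
  | [] => ""
  | entry :: rest =>
    let currentIndex : Int := ((PySem.List.index? lut entry).getD 0 : Nat) + 1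
    encodeLetterOrElse (encodeLetterInner c currentIndex entry.toList [])
      (encodeLetterLoop c lut rest)

def encode_letter (c : String) : String :=
  if c == " " then "*"
  else if c == "." then c
  else
    let c := PySem.Str.lower c
    let lut : List String := ["_,@", "abc", "def", "ghi", "jkl", "mno", "pqrs", "tuv", "wxyz"]
    encodeLetterLoop c lut lut

-- ===== PORT B =====
-- Source B's single-character branch: keypad arithmetic on ord(c), then str(digit) * rep;
-- 'a' <= c <= 'z' on single-char Python strings is exactly the Char comparison.
def encodeAltChar (ch : Char) : String :=
  if 'a' ≤ ch ∧ ch ≤ 'z' then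
    let idx : Int := (ch.toNat : Int) - 97
    let dr : Int × Int :=
      if idx < 15 then (2 + PySem.Int.floordiv idx 3, PySem.Int.mod idx 3 + 1)
      else if idx < 19 then (7, idx - 14)
      else if idx < 22 then (8, idx - 18)
      else (9, idx - 21)
    String.ofList (PySem.List.pyRepeat (PySem.Int.toStr dr.1).toList dr.2)
  else
    let pos : Int := PySem.Str.find "_,@" (String.ofList [ch])
    if pos ≥ 0 then String.ofList (PySem.List.pyRepeat ['1'] (pos + 1))
    else ""

def encode_letter_alt (c : String) : String :=
  if c == " " then "*"
  else if c == "." then c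
  else
    let c := PySem.Str.lower c
    if PySem.Str.len c ≠ 1 then ""
    else
      match c.toList with
      | [ch] => encodeAltChar ch
      | _ => ""   -- unreachable: the guard above ensures exactly one character

-- ===== PRECONDITION & SPEC =====
def Spec_encode_letter (c : String) (out : String) : Prop := out = encode_letter_alt c
instance (c : String) (out : String) : Decidable (Spec_encode_letter c out) := by unfold Spec_encode_letter; infer_instance

-- ===== CLAIM (what is proved, stated in full; the proofs are below) =====
def Claim_equal_encode_letter : Prop := ∀ (c : String), Dom_encode_letter c → Spec_encode_letter c (encode_letter c)

-- ===== LEMMAS AND PROOFS =====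
theorem charEqOfToNat (c d : Char) (h : c.toNat = d.toNat) : c = d := by
  have h1 := Char.ofNat_toNat c
  have h2 := Char.ofNat_toNat d
  rw [h] at h1
  exact h1.symm.trans h2

-- A's scan returns "" on any string that is not a single character
theorem encodeLetterInner_long (s : String) (hs : s.toList.length ≠ 1)
    (i : Int) (chars acc : List Char) : encodeLetterInner s i chars acc = none := by
  induction chars generalizing acc with
  | nil => rfl
  | cons ch rest ih =>
    simp only [encodeLetterInner]
    rw [if_neg, ih]
    intro h
    rw [beq_iff_eq] at h
    apply hs
    rw [← h]
    simp

theorem encodeLetterLoop_long (s : String) (hs : s.toList.length ≠ 1)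
    (lut entries : List String) : encodeLetterLoop s lut entries = "" := by
  induction entries with
  | nil => rfl
  | cons e rest ih =>
    simp only [encodeLetterLoop, encodeLetterInner_long s hs, encodeLetterOrElse, ih]


theorem encodeLetterInner_mismatch (s : String) (i : Int) (chars acc : List Char)
    (h : ∀ x ∈ chars, String.ofList [x] ≠ s) : encodeLetterInner s i chars acc = none := by
  induction chars generalizing acc with
  | nil => rfl
  | cons x rest ih =>
    simp only [encodeLetterInner]
    rw [if_neg, ih]
    · intro y hy; exact h y (List.mem_cons_of_mem _ hy)
    · intro hb
      rw [beq_iff_eq] at hb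
      exact h x (List.mem_cons_self ..) hb

theorem encodeLetterLoop_mismatch (s : String) (lut entries : List String)
    (h : ∀ e ∈ entries, ∀ x ∈ e.toList, String.ofList [x] ≠ s) :
    encodeLetterLoop s lut entries = "" := by
  induction entries with
  | nil => rfl
  | cons e rest ih =>
    simp only [encodeLetterLoop]
    rw [encodeLetterInner_mismatch s _ _ _ (h e (List.mem_cons_self ..)),
      ih (fun e' he' => h e' (List.mem_cons_of_mem _ he'))]
    rfl

-- the single-character core: A's scan equals B's arithmetic for every character
set_option maxHeartbeats 2000000 in
theorem encode_letter_single (ch : Char) :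
    encodeLetterLoop (String.ofList [ch])
      ["_,@", "abc", "def", "ghi", "jkl", "mno", "pqrs", "tuv", "wxyz"]
      ["_,@", "abc", "def", "ghi", "jkl", "mno", "pqrs", "tuv", "wxyz"]
      = encodeAltChar ch := by
  by_cases h1 : ch = '_'; · subst h1; decide
  by_cases h2 : ch = ','; · subst h2; decide
  by_cases h3 : ch = '@'; · subst h3; decide
  by_cases h4 : ch = 'a'; · subst h4; decide
  by_cases h5 : ch = 'b'; · subst h5; decide
  by_cases h6 : ch = 'c'; · subst h6; decide
  by_cases h7 : ch = 'd'; · subst h7; decide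
  by_cases h8 : ch = 'e'; · subst h8; decide
  by_cases h9 : ch = 'f'; · subst h9; decide
  by_cases h10 : ch = 'g'; · subst h10; decide
  by_cases h11 : ch = 'h'; · subst h11; decide
  by_cases h12 : ch = 'i'; · subst h12; decide
  by_cases h13 : ch = 'j'; · subst h13; decide
  by_cases h14 : ch = 'k'; · subst h14; decide
  by_cases h15 : ch = 'l'; · subst h15; decide
  by_cases h16 : ch = 'm'; · subst h16; decide
  by_cases h17 : ch = 'n'; · subst h17; decide
  by_cases h18 : ch = 'o'; · subst h18; decide
  by_cases h19 : ch = 'p'; · subst h19; decide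
  by_cases h20 : ch = 'q'; · subst h20; decide
  by_cases h21 : ch = 'r'; · subst h21; decide
  by_cases h22 : ch = 's'; · subst h22; decide
  by_cases h23 : ch = 't'; · subst h23; decide
  by_cases h24 : ch = 'u'; · subst h24; decide
  by_cases h25 : ch = 'v'; · subst h25; decide
  by_cases h26 : ch = 'w'; · subst h26; decide
  by_cases h27 : ch = 'x'; · subst h27; decide
  by_cases h28 : ch = 'y'; · subst h28; decide
  by_cases h29 : ch = 'z'; · subst h29; decide
  -- default: ch matches no table character; both sides return ""
  have habc : ¬ ('a' ≤ ch ∧ ch ≤ 'z') := by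
    rintro ⟨hl, hr⟩
    have hl' : 97 ≤ ch.toNat := hl
    have hr' : ch.toNat ≤ 122 := hr
    have e4 : ch.toNat ≠ 97 := fun h => h4 (charEqOfToNat ch 'a' h)
    have e5 : ch.toNat ≠ 98 := fun h => h5 (charEqOfToNat ch 'b' h)
    have e6 : ch.toNat ≠ 99 := fun h => h6 (charEqOfToNat ch 'c' h)
    have e7 : ch.toNat ≠ 100 := fun h => h7 (charEqOfToNat ch 'd' h)
    have e8 : ch.toNat ≠ 101 := fun h => h8 (charEqOfToNat ch 'e' h)
    have e9 : ch.toNat ≠ 102 := fun h => h9 (charEqOfToNat ch 'f' h)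
    have e10 : ch.toNat ≠ 103 := fun h => h10 (charEqOfToNat ch 'g' h)
    have e11 : ch.toNat ≠ 104 := fun h => h11 (charEqOfToNat ch 'h' h)
    have e12 : ch.toNat ≠ 105 := fun h => h12 (charEqOfToNat ch 'i' h)
    have e13 : ch.toNat ≠ 106 := fun h => h13 (charEqOfToNat ch 'j' h)
    have e14 : ch.toNat ≠ 107 := fun h => h14 (charEqOfToNat ch 'k' h)
    have e15 : ch.toNat ≠ 108 := fun h => h15 (charEqOfToNat ch 'l' h)
    have e16 : ch.toNat ≠ 109 := fun h => h16 (charEqOfToNat ch 'm' h)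
    have e17 : ch.toNat ≠ 110 := fun h => h17 (charEqOfToNat ch 'n' h)
    have e18 : ch.toNat ≠ 111 := fun h => h18 (charEqOfToNat ch 'o' h)
    have e19 : ch.toNat ≠ 112 := fun h => h19 (charEqOfToNat ch 'p' h)
    have e20 : ch.toNat ≠ 113 := fun h => h20 (charEqOfToNat ch 'q' h)
    have e21 : ch.toNat ≠ 114 := fun h => h21 (charEqOfToNat ch 'r' h)
    have e22 : ch.toNat ≠ 115 := fun h => h22 (charEqOfToNat ch 's' h)
    have e23 : ch.toNat ≠ 116 := fun h => h23 (charEqOfToNat ch 't' h)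
    have e24 : ch.toNat ≠ 117 := fun h => h24 (charEqOfToNat ch 'u' h)
    have e25 : ch.toNat ≠ 118 := fun h => h25 (charEqOfToNat ch 'v' h)
    have e26 : ch.toNat ≠ 119 := fun h => h26 (charEqOfToNat ch 'w' h)
    have e27 : ch.toNat ≠ 120 := fun h => h27 (charEqOfToNat ch 'x' h)
    have e28 : ch.toNat ≠ 121 := fun h => h28 (charEqOfToNat ch 'y' h)
    have e29 : ch.toNat ≠ 122 := fun h => h29 (charEqOfToNat ch 'z' h)
    omega
  have hfind : PySem.Str.find "_,@" (String.ofList [ch]) = -1 := by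
    rw [PySem.Str.find_eq_neg_one_iff]
    simp only [String.toList_ofList]
    have hts : "_,@".toList = ['_', ',', '@'] := by decide
    rw [hts, List.singleton_infix_iff]
    intro hm
    have : ch = '_' ∨ ch = ',' ∨ ch = '@' := by simpa using hm
    rcases this with h | h | h
    · exact h1 h
    · exact h2 h
    · exact h3 h
  have hB : encodeAltChar ch = "" := by
    rw [encodeAltChar, if_neg habc]
    simp only [hfind]
    norm_num
  rw [hB]
  apply encodeLetterLoop_mismatch
  intro e he x hx heq
  rw [String.ofList_inj, List.cons.injEq] at heq
  obtain ⟨hx2, -⟩ := heq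
  subst hx2
  fin_cases he <;> simp_all

-- ===== VERDICT (by name: the statement is the Claim_ definition above) =====
theorem encode_letter_eq (c : String) : encode_letter c = encode_letter_alt c := by
  unfold encode_letter encode_letter_alt
  by_cases hsp : c == " "
  · simp [hsp]
  by_cases hdot : c == "."
  · simp [hsp, hdot]
  simp only [hsp, hdot, Bool.false_eq_true, not_false_eq_true, if_neg]
  generalize PySem.Str.lower c = s
  have hs : String.ofList s.toList = s := String.ofList_toList
  rcases hl : s.toList with _ | ⟨ch, rest⟩
  · rw [hl] at hs
    rw [← hs]
    decide
  rcases rest with _ | ⟨ch2, rest2⟩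
  · rw [hl] at hs
    rw [← hs]
    simpa using encode_letter_single ch
  · rw [encodeLetterLoop_long s (by rw [hl]; simp), if_pos (by simp [hl]; omega)]

theorem encode_letter_spec : Claim_equal_encode_letter := by
  intro c _
  unfold Spec_encode_letter
  exact encode_letter_eq c
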